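-- pv_equiv track=rewrite | github.com/xhy0303/- | 作业/Python程序设计/作业1/邻里关系.py | offByExtra
-- ===== SOURCE A (Python) =====
-- def offByExtra(str1,str2):
--     if(len(str1)>len(str2)):
--         for i in range(len(str1)):
--             tmp=str1[0:i]+str1[i+1:]
--             if tmp==str2:
--                 return True
--     else:
--         for i in range(len(str2)):
--             tmp = str2[0:i] + str2[i + 1:]
--             if tmp == str1:
--                 return True
--     return False
-- ===== SOURCE B (Python) =====
-- def offByExtra(str1, str2):
--     # two-pointer: longer must be shorter plus exactly one inserted char
--     if len(str1) < len(str2):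
--         str1, str2 = str2, str1
--     if len(str1) != len(str2) + 1:
--         return False
--     i = 0
--     while i < len(str2) and str1[i] == str2[i]:
--         i += 1
--     return str1[i + 1:] == str2[i:]
-- ===== Notes on version B (the rewrite author's own statement) =====
-- stated objective: faster
-- what changed: Replace trying every deletion position of the longer string (each building a new string and comparing) by a length check plus a single two-pointer scan to the first mismatch followed by one suffix comparison.
import Mathlib
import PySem

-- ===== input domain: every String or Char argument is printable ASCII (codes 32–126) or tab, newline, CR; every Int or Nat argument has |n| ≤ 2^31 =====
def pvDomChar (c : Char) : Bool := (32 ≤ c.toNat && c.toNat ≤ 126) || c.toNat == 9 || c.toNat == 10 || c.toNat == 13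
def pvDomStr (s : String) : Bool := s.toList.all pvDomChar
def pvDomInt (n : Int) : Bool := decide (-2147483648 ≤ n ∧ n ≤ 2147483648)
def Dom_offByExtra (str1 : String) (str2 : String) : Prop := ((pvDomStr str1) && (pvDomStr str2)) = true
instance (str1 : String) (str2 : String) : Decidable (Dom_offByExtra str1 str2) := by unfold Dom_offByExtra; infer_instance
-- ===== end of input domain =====

-- B replaces A's try-every-deletion quadratic loop by a length check and a single
-- two-pointer scan to the first mismatch plus one suffix comparison (faster, O(n)).


-- ===== PORT A =====
-- A's loop body: tmp = s[0:i] + s[i+1:]; since 0 ≤ i < len s, the slices are exactly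
-- List.take i and List.drop (i+1); the early-return for-loop is List.any over range.
def pvDelLoop (l t : List Char) : Bool :=
  (List.range l.length).any (fun i => (l.take i ++ l.drop (i + 1)) == t)

def offByExtra (str1 : String) (str2 : String) : Bool :=
  let l1 := str1.toList
  let l2 := str2.toList
  if l1.length > l2.length then pvDelLoop l1 l2 else pvDelLoop l2 l1

-- ===== PORT B =====
-- the while-loop of Source B: advance while heads match; at the first mismatch compare
-- long[i+1:] with short[i:] (and with short exhausted, long's tail must be empty).
def pvScan : List Char → List Char → Bool
  | a :: l, b :: s => if a == b then pvScan l s else l == b :: s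
  | _ :: l, [] => l == ([] : List Char)
  | [], _ => false

def offByExtra_alt (str1 : String) (str2 : String) : Bool :=
  let l1 := str1.toList
  let l2 := str2.toList
  let long := if l1.length < l2.length then l2 else l1
  let short := if l1.length < l2.length then l1 else l2
  if long.length ≠ short.length + 1 then false else pvScan long short

-- ===== PRECONDITION & SPEC =====
def Spec_offByExtra (str1 : String) (str2 : String) (out : Bool) : Prop := out = offByExtra_alt str1 str2
instance (str1 : String) (str2 : String) (out : Bool) : Decidable (Spec_offByExtra str1 str2 out) := by unfold Spec_offByExtra; infer_instance

-- ===== CLAIM (what is proved, stated in full; the proofs are below) =====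
def Claim_equal_offByExtra : Prop := ∀ (str1 : String) (str2 : String), Dom_offByExtra str1 str2 → Spec_offByExtra str1 str2 (offByExtra str1 str2)

-- ===== LEMMAS AND PROOFS =====

-- if the lengths are not off by one, no deletion of l can equal t
theorem pvDelLoop_len (l t : List Char) (h : l.length ≠ t.length + 1) :
    pvDelLoop l t = false := by
  unfold pvDelLoop
  rw [List.any_eq_false]
  intro i hi
  simp only [List.mem_range] at hi
  simp only [beq_iff_eq]
  intro he
  have := congrArg List.length he
  simp only [List.length_append, List.length_take, List.length_drop] at this
  omega

-- deleting the head works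
theorem pvDelLoop_self (c : Char) (s : List Char) : pvDelLoop (c :: s) s = true := by
  unfold pvDelLoop
  rw [List.any_eq_true]
  exact ⟨0, by simp, by simp⟩


theorem pvDelLoop_eq_scan : ∀ (s l : List Char), l.length = s.length + 1 →
    pvDelLoop l s = pvScan l s := by
  intro s
  induction s with
  | nil =>
      intro l h
      match l with
      | [a] => simp [pvDelLoop, pvScan]
      | a :: b :: l => simp at h
  | cons b s ih =>
      intro l h
      match l with
      | [] => simp at h
      | a :: l =>
        have hlen : l.length = s.length + 1 := by simpa using h
        unfold pvDelLoop
        have hr : (a :: l).length = l.length + 1 := by simp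
        rw [hr, List.range_succ_eq_map]
        simp only [List.any_cons, List.any_map]
        have hrest : (List.range l.length).any
            ((fun i => ((a :: l).take i ++ (a :: l).drop (i + 1)) == (b :: s)) ∘ Nat.succ)
            = ((a == b) && pvDelLoop l s) := by
          by_cases hab : a = b
          · subst hab
            have : (a == a) = true := by simp
            rw [this, Bool.true_and]
            have hf : ((fun i => ((a :: l).take i ++ (a :: l).drop (i + 1)) == (a :: s)) ∘ Nat.succ)
                = (fun i => (l.take i ++ l.drop (i + 1)) == s) := by
              funext i
              simp [Function.comp, List.take_succ_cons]
            rw [hf]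
            rfl
          · have hab' : (a == b) = false := by simp [hab]
            rw [hab', Bool.false_and, List.any_eq_false]
            intro i hi
            simp [Function.comp, hab]
        rw [hrest]
        simp only [List.take_zero, List.drop_succ_cons, List.drop_zero, List.nil_append]
        by_cases hab : a = b
        · subst hab
          have hs : pvScan (a :: l) (a :: s) = pvScan l s := by simp [pvScan]
          rw [hs, ih l hlen]
          by_cases hl : l = a :: s
          · subst hl
            rw [← ih (a :: s) hlen]
            simp [pvDelLoop_self]
          · simp [hl]
        · have hs : pvScan (a :: l) (b :: s) = (l == b :: s) := by
            simp [pvScan, hab]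
          rw [hs]
          simp [hab]

-- ===== VERDICT (by name: the statement is the Claim_ definition above) =====
theorem offByExtra_spec : Claim_equal_offByExtra := by
  intro str1 str2 _
  unfold Spec_offByExtra offByExtra offByExtra_alt
  set l1 := str1.toList with h1
  set l2 := str2.toList with h2
  clear h1 h2
  by_cases hlt : l1.length < l2.length
  · simp only [if_pos hlt, if_neg (by omega : ¬ l1.length > l2.length)]
    by_cases he : l2.length = l1.length + 1
    · simp only [if_neg (by omega : ¬ l2.length ≠ l1.length + 1)]
      exact pvDelLoop_eq_scan l1 l2 he
    · simp only [if_pos (by omega : l2.length ≠ l1.length + 1)]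
      exact pvDelLoop_len l2 l1 he
  · simp only [if_neg hlt]
    by_cases hgt : l1.length > l2.length
    · simp only [if_pos hgt]
      by_cases he : l1.length = l2.length + 1
      · simp only [if_neg (by omega : ¬ l1.length ≠ l2.length + 1)]
        exact pvDelLoop_eq_scan l2 l1 he
      · simp only [if_pos (by omega : l1.length ≠ l2.length + 1)]
        exact pvDelLoop_len l1 l2 he
    · simp only [if_neg hgt, if_pos (by omega : l1.length ≠ l2.length + 1)]
      exact pvDelLoop_len l2 l1 (by omega)
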